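-- pv_equiv track=rewrite | github.com/dasl-/roots | chords.py | enumerate_inversions
-- ===== SOURCE A (Python) =====
-- def enumerate_inversions(chord):
--     inversions = [chord]
--     inversion = chord
--     for note_with_octave in chord:
--         if note_with_octave == chord[-1]:
--             break
--         note = note_with_octave[0]
--         octave = int(note_with_octave[1])
--         inversion = inversion[1:]
--         inversion.append(f'{note}{octave + 1}')
--         inversions.append(inversion)
--     return inversions
-- ===== SOURCE B (Python) =====
-- def enumerate_inversions(chord):
--     if not chord:
--         return [chord]
--     stop = chord.index(chord[-1])
--     inversions = [chord]
--     for k in range(1, stop + 1):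
--         inversions.append(chord[k:] + [f'{c[0]}{int(c[1]) + 1}' for c in chord[:k]])
--     return inversions
-- ===== Notes on version B (the rewrite author's own statement) =====
-- stated objective: alternative
-- what changed: Instead of rolling one mutable inversion list forward (drop head, append raised note each step), B guards the empty chord, computes the break position once via chord.index(chord[-1]) and builds each inversion independently from slices as chord[k:] plus the raised prefix chord[:k].
import Mathlib
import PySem

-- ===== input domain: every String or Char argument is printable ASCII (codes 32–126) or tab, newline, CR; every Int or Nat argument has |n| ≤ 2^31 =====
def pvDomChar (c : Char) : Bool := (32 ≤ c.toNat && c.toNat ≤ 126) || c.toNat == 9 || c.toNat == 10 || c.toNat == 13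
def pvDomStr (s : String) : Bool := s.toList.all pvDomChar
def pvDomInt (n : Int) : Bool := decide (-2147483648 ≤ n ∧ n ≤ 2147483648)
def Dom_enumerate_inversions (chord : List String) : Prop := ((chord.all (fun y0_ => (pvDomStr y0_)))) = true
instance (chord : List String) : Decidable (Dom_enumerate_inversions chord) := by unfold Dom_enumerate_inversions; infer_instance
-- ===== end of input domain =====

-- B changes the decomposition only (same cost): inversions are built independently from slices
-- of the input instead of rolling one accumulator list forward step by step.

-- ===== PORT A =====
-- the for-loop with its break: state = (remaining notes, current inversion, collected inversions)
def eiLoop (last : String) : List String → List String → List (List String) → List (List String)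
  | [], _, invs => invs
  | n :: rest, inv, invs =>
    if n = last then invs
    else
      let note := (PySem.Str.pyGet? n 0).getD ' '
      let octave := (PySem.Int.ofChars? [(PySem.Str.pyGet? n 1).getD ' ']).getD 0
      let inv' := PySem.List.slice inv (some 1) none ++ [String.ofList [note] ++ PySem.Int.toStr (octave + 1)]
      eiLoop last rest inv' (invs ++ [inv'])

def enumerate_inversions (chord : List String) : List (List String) :=
  eiLoop ((PySem.List.pyGet? chord (-1)).getD "") chord chord [chord]

-- ===== PORT B =====
-- f'{c[0]}{int(c[1]) + 1}'
def pvRaise (c : String) : String :=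
  let note := (PySem.Str.pyGet? c 0).getD ' '
  let octave := (PySem.Int.ofChars? [(PySem.Str.pyGet? c 1).getD ' ']).getD 0
  String.ofList [note] ++ PySem.Int.toStr (octave + 1)

def enumerate_inversions_alt (chord : List String) : List (List String) :=
  if chord = [] then [chord]
  else
    let stop : Nat := (PySem.List.index? chord ((PySem.List.pyGet? chord (-1)).getD "")).getD 0
    [chord] ++ (PySem.List.pyRange 1 ((stop : Int) + 1) 1).map (fun k =>
      PySem.List.slice chord (some k) none ++ (PySem.List.slice chord none (some k)).map pvRaise)

-- ===== PRECONDITION & SPEC =====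
-- Pre_ excludes exactly the inputs where Python A raises: some note strictly before the
-- first occurrence of the last note has no second character or one that int() rejects
-- (IndexError / ValueError in both A and B).
def Pre_enumerate_inversions (chord : List String) : Prop :=
  ∀ s ∈ chord.take (chord.idxOf (chord.getLastD "")),
    2 ≤ s.toList.length ∧ (PySem.Int.ofChars? [s.toList.getD 1 ' ']).isSome
instance (chord : List String) : Decidable (Pre_enumerate_inversions chord) := by
  unfold Pre_enumerate_inversions; infer_instance

def pvWitness_enumerate_inversions : List String := ["C4", "E4", "G4"]

def Spec_enumerate_inversions (chord : List String) (out : List (List String)) : Prop := out = enumerate_inversions_alt chord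
instance (chord : List String) (out : List (List String)) : Decidable (Spec_enumerate_inversions chord out) := by unfold Spec_enumerate_inversions; infer_instance

-- ===== CLAIM (what is proved, stated in full; the proofs are below) =====
def Claim_equal_enumerate_inversions : Prop := ∀ (chord : List String), Dom_enumerate_inversions chord → Pre_enumerate_inversions chord → Spec_enumerate_inversions chord (enumerate_inversions chord)

-- ===== LEMMAS AND PROOFS =====

-- common description of the inversions after the first: A's loop and B's slice map both produce it
def invList (last : String) : List String → List String → List (List String)
  | [], _ => []
  | n :: rest, pre =>
    if n = last then []
    else (rest ++ (pre ++ [n]).map pvRaise) :: invList last rest (pre ++ [n])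

theorem eiLoop_eq_invList (last : String) (suf : List String) :
    ∀ (pre : List String) (acc : List (List String)),
    eiLoop last suf (suf ++ pre.map pvRaise) acc = acc ++ invList last suf pre := by
  induction suf with
  | nil => intro pre acc; simp [eiLoop, invList]
  | cons n rest ih =>
    intro pre acc
    by_cases h : n = last
    · simp [eiLoop, invList, h]
    · rw [eiLoop, invList]
      simp only [if_neg h]
      have hslice : PySem.List.slice ((n :: rest) ++ pre.map pvRaise) (some 1) none
          = rest ++ pre.map pvRaise := by
        rw [PySem.List.slice_from_one]; rfl
      rw [hslice]
      have harr : (rest ++ List.map pvRaise pre) ++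
            [String.ofList [(PySem.Str.pyGet? n 0).getD ' ']
              ++ PySem.Int.toStr ((PySem.Int.ofChars? [(PySem.Str.pyGet? n 1).getD ' ']).getD 0 + 1)]
          = rest ++ (pre ++ [n]).map pvRaise := by
        simp [pvRaise, List.append_assoc]
      rw [harr, ih (pre ++ [n]) (acc ++ [rest ++ (pre ++ [n]).map pvRaise])]
      simp

theorem mapRange_eq_invList (last : String) (suf : List String) :
    ∀ (pre : List String),
    (PySem.List.pyRange ((pre.length : Int) + 1) ((pre.length : Int) + (suf.idxOf last : Int) + 1) 1).map
      (fun k => PySem.List.slice (pre ++ suf) (some k) none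
        ++ (PySem.List.slice (pre ++ suf) none (some k)).map pvRaise)
    = invList last suf pre := by
  induction suf with
  | nil =>
    intro pre
    rw [PySem.List.pyRange_one_eq_nil (by simp)]
    simp [invList]
  | cons n rest ih =>
    intro pre
    by_cases h : n = last
    · rw [invList, if_pos h]
      rw [PySem.List.pyRange_one_eq_nil (by simp [h])]
      simp
    · rw [invList, if_neg h]
      have hidx : ((n :: rest).idxOf last : Int) = (rest.idxOf last : Int) + 1 := by
        simp [h]
      rw [hidx]
      rw [PySem.List.pyRange_one_cons (by omega)]
      rw [List.map_cons]
      have e1 : PySem.List.slice (pre ++ n :: rest) (some ((pre.length : Int) + 1)) none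
          = rest := by
        have : ((pre.length : Int) + 1) = ((pre.length + 1 : Nat) : Int) := by push_cast; ring
        rw [this, PySem.List.slice_from_natCast]
        have : pre ++ n :: rest = (pre ++ [n]) ++ rest := by simp
        rw [this]
        have hl : pre.length + 1 = (pre ++ [n]).length := by simp
        rw [hl, List.drop_left]
      have e2 : PySem.List.slice (pre ++ n :: rest) none (some ((pre.length : Int) + 1))
          = pre ++ [n] := by
        have : ((pre.length : Int) + 1) = ((pre.length + 1 : Nat) : Int) := by push_cast; ring
        rw [this, PySem.List.slice_to_natCast]
        have : pre ++ n :: rest = (pre ++ [n]) ++ rest := by simp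
        rw [this]
        have hl : pre.length + 1 = (pre ++ [n]).length := by simp
        rw [hl, List.take_left]
      rw [e1, e2]
      have ih' := ih (pre ++ [n])
      have hpre : pre ++ n :: rest = (pre ++ [n]) ++ rest := by simp
      have hlen : (((pre ++ [n]).length : Nat) : Int) = (pre.length : Int) + 1 := by
        simp
      rw [hpre]
      rw [← ih']
      congr 1
      rw [hlen]
      ring_nf

theorem ports_agree (chord : List String) :
    enumerate_inversions chord = enumerate_inversions_alt chord := by
  by_cases hnil : chord = []
  · subst hnil; rfl
  · unfold enumerate_inversions enumerate_inversions_alt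
    rw [if_neg hnil]
    set last := (PySem.List.pyGet? chord (-1)).getD "" with hlast
    have hmem : last ∈ chord := by
      rw [hlast, PySem.List.pyGet?_neg_one]
      have := List.getLast?_isSome.2 hnil
      rcases Option.isSome_iff_exists.1 this with ⟨x, hx⟩
      rw [hx]; exact List.mem_of_getLast? hx
    have hstop : (PySem.List.index? chord last).getD 0 = chord.idxOf last := by
      rw [PySem.List.index?_eq_idxOf?]
      obtain ⟨k, hk⟩ := Option.isSome_iff_exists.1 (List.isSome_idxOf?.mpr hmem)
      rw [hk, List.idxOf_eq_getD_idxOf?, hk]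
      rfl
    have hA : eiLoop last chord chord [chord] = [chord] ++ invList last chord [] := by
      have := eiLoop_eq_invList last chord [] [chord]
      simpa using this
    have hB := mapRange_eq_invList last chord []
    simp only [List.length_nil, Nat.cast_zero, zero_add, List.nil_append] at hB
    rw [hA, hstop, ← hB]

-- ===== VERDICT (by name: the statement is the Claim_ definition above) =====
theorem enumerate_inversions_spec : Claim_equal_enumerate_inversions := by
  intro chord _ _
  unfold Spec_enumerate_inversions
  exact ports_agree chord
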